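-- pv_equiv track=rewrite | github.com/prashgarg/frontiergraph | scripts/build_exploratory_testbeds.py | _edge_pair_distance
-- ===== SOURCE A (Python) =====
-- from collections import Counter, defaultdict, deque
--
-- DISTANCE_CAP = 6
--
-- def _shortest_path_cap(adj: dict[str, set[str]], start: str, targets: set[str], cap: int = DISTANCE_CAP) -> int | None:
--     if start in targets:
--         return 0
--     seen = {start}
--     q = deque([(start, 0)])
--     while q:
--         node, dist = q.popleft()
--         if dist >= cap:
--             continue
--         for nxt in adj.get(node, set()):
--             if nxt in seen:
--                 continue
--             if nxt in targets:
--                 return dist + 1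
--             seen.add(nxt)
--             q.append((nxt, dist + 1))
--     return None
--
-- def _edge_pair_distance(adj: dict[str, set[str]], edge_a: tuple[str, str], edge_b: tuple[str, str]) -> int | None:
--     a_nodes = {str(edge_a[0]), str(edge_a[1])}
--     b_nodes = {str(edge_b[0]), str(edge_b[1])}
--     dists = []
--     for node in a_nodes:
--         dist = _shortest_path_cap(adj, node, b_nodes, cap=DISTANCE_CAP)
--         if dist is not None:
--             dists.append(dist)
--     return min(dists) if dists else None
-- ===== SOURCE B (Python) =====
-- DISTANCE_CAP = 6
--
-- def _edge_pair_distance(adj, edge_a, edge_b):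
--     # Bounded fixed-point saturation: grow the set of nodes reachable from both
--     # endpoints of edge_a at once, one relaxation round per distance, and return
--     # the first round at which it meets edge_b's endpoints.
--     targets = {str(edge_b[0]), str(edge_b[1])}
--     reach = {str(edge_a[0]), str(edge_a[1])}
--     for d in range(DISTANCE_CAP + 1):
--         if reach & targets:
--             return d
--         reach |= {nb for n in reach for nb in adj.get(n, ())}
--     return None
-- ===== Notes on version B (the rewrite author's own statement) =====
-- stated objective: simpler
-- what changed: Replaces the two per-endpoint queue BFS searches plus list+min() combination by a single bounded fixed-point saturation: one reachable-set grown from both endpoints of edge_a by one relaxation round per distance (no queue, no visited/frontier bookkeeping, no per-node distance tags), returning the first round at which it meets edge_b's endpoints.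
import Mathlib
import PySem

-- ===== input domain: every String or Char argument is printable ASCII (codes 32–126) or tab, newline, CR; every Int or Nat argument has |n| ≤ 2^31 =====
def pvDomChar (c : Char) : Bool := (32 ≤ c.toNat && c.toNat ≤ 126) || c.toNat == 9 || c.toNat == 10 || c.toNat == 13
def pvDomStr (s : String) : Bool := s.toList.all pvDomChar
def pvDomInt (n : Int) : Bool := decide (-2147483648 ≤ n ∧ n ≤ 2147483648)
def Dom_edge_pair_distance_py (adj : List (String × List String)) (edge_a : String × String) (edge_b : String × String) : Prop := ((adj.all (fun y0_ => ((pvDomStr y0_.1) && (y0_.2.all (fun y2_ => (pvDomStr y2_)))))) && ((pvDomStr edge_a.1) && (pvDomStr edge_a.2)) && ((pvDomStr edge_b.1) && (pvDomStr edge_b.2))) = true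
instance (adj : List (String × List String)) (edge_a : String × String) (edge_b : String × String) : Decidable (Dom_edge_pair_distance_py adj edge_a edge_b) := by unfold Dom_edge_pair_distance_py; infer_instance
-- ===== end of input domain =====

-- B replaces A's two per-endpoint queue BFS searches (and list+min() combination) by one bounded
-- fixed-point saturation of the set reachable from both endpoints of edge_a, one relaxation round
-- per distance: a different algorithm chosen for being plainer, not faster.

-- ===== PORT A =====

-- inner 'for nxt in adj.get(node, set())' loop of _shortest_path_cap
def spcExpand (targets : PySem.Set String) (seen : PySem.Set String)
    (q : List (String × Int)) (ns : List String) (dist : Int) :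
    Sum Int (PySem.Set String × List (String × Int)) :=
  match ns with
  | [] => .inr (seen, q)
  | n :: rest =>
      if PySem.Set.contains seen n then spcExpand targets seen q rest dist
      else if PySem.Set.contains targets n then .inl (dist + 1)
      else spcExpand targets (PySem.Set.add seen n) (q ++ [(n, dist + 1)]) rest dist

-- potential used only for the termination of the queue loop
def spcPhi (adj : List (String × List String)) (seen : PySem.Set String)
    (q : List (String × Int)) : Nat :=
  q.length + (((adj.map Prod.snd).flatten.dedup).filter (fun x => !(List.contains seen x))).length

theorem getD_mem_flatten (adj : List (String × List String)) (node : String) :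
    ∀ x ∈ PySem.Dict.getD ⟨adj⟩ node [], x ∈ (adj.map Prod.snd).flatten := by
  intro x hx
  simp only [PySem.Dict.getD, PySem.Dict.get?] at hx
  cases hf : List.find? (fun p => p.1 == node) (PySem.Dict.mk adj).items with
  | none => rw [hf] at hx; simp at hx
  | some p =>
      rw [hf] at hx
      simp at hx
      exact List.mem_flatten.2 ⟨p.2, List.mem_map_of_mem (List.mem_of_find?_eq_some hf), hx⟩

theorem filter_length_lt (l s : List String) (n : String) (hn : n ∈ l) (hns : n ∉ s) :
    (l.filter (fun x => !(List.contains (s ++ [n]) x))).length + 1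
      ≤ (l.filter (fun x => !(List.contains s x))).length := by
  have hsub : (l.filter (fun x => !(List.contains (s ++ [n]) x))).Sublist
      (l.filter (fun x => !(List.contains s x))) := by
    apply List.monotone_filter_right
    intro x hx
    simp at hx ⊢
    exact hx.1
  rcases Nat.lt_or_ge (l.filter (fun x => !(List.contains (s ++ [n]) x))).length
      (l.filter (fun x => !(List.contains s x))).length with h | h
  · omega
  · exfalso
    have heq := hsub.eq_of_length (Nat.le_antisymm hsub.length_le h)
    have h1 : n ∈ l.filter (fun x => !(List.contains s x)) := by
      simp [List.mem_filter, hn, hns]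
    rw [← heq] at h1
    simp [List.mem_filter] at h1

theorem spcExpand_phi (adj : List (String × List String)) (targets : PySem.Set String) :
    ∀ (ns : List String) (seen : PySem.Set String) (q : List (String × Int)) (dist : Int)
      (seen' : PySem.Set String) (q' : List (String × Int)),
      (∀ x ∈ ns, x ∈ (adj.map Prod.snd).flatten) →
      spcExpand targets seen q ns dist = .inr (seen', q') →
      spcPhi adj seen' q' ≤ spcPhi adj seen q := by
  intro ns
  induction ns with
  | nil => intro seen q dist seen' q' _ h; simp [spcExpand] at h; simp [h.1, h.2]
  | cons n rest ih =>
      intro seen q dist seen' q' hmem h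
      simp only [spcExpand] at h
      by_cases h1 : n ∈ seen
      · rw [if_pos (by simpa [PySem.Set.contains_iff] using h1)] at h
        exact ih seen q dist seen' q' (fun x hx => hmem x (by simp [hx])) h
      · rw [if_neg (by simpa [PySem.Set.contains_iff] using h1)] at h
        by_cases h2 : PySem.Set.contains targets n = true
        · rw [if_pos h2] at h; exact absurd h (by simp)
        · rw [if_neg h2] at h
          have step := ih (PySem.Set.add seen n) (q ++ [(n, dist + 1)]) dist seen' q'
            (fun x hx => hmem x (by simp [hx])) h
          refine le_trans step ?_
          have hadd : PySem.Set.add seen n = seen ++ [n] := PySem.Set.add_of_not_mem h1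
          have hnd : n ∈ (adj.map Prod.snd).flatten.dedup :=
            List.mem_dedup.2 (hmem n (by simp))
          have hlt := filter_length_lt ((adj.map Prod.snd).flatten.dedup) seen n hnd h1
          simp only [spcPhi, hadd, List.length_append, List.length_cons, List.length_nil]
          omega

-- 'while q:' loop of _shortest_path_cap
def spcLoop (adj : List (String × List String)) (targets : PySem.Set String)
    (seen : PySem.Set String) (q : List (String × Int)) : Option Int :=
  match q with
  | [] => none
  | (node, dist) :: rest =>
      if 6 ≤ dist then spcLoop adj targets seen rest
      else
        match hE : spcExpand targets seen rest (PySem.Dict.getD ⟨adj⟩ node []) dist with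
        | .inl r => some r
        | .inr (seen', q') => spcLoop adj targets seen' q'
termination_by spcPhi adj seen q
decreasing_by
  · simp only [spcPhi, List.length_cons]; omega
  · have := spcExpand_phi adj targets (PySem.Dict.getD ⟨adj⟩ node []) seen rest dist seen' q'
      (getD_mem_flatten adj node) hE
    simp only [spcPhi, List.length_cons] at this ⊢
    omega

def shortest_path_cap (adj : List (String × List String)) (start : String)
    (targets : PySem.Set String) : Option Int :=
  if PySem.Set.contains targets start then some 0
  else spcLoop adj targets (PySem.Set.ofList [start]) [(start, 0)]

def edge_pair_distance_py (adj : List (String × List String)) (edge_a : String × String) (edge_b : String × String) : Option Int :=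
  let a_nodes : PySem.Set String := PySem.Set.ofList [edge_a.1, edge_a.2]
  let b_nodes : PySem.Set String := PySem.Set.ofList [edge_b.1, edge_b.2]
  let dists : List Int := a_nodes.foldl
    (fun acc node =>
      match shortest_path_cap adj node b_nodes with
      | some d => acc ++ [d]
      | none => acc) []
  if dists.isEmpty then none else PySem.List.min? dists (fun x => x)

-- ===== PORT B =====

-- 'reach |= {nb for n in reach for nb in adj.get(n, ())}'
def satStep (adj : List (String × List String)) (reach : PySem.Set String) : PySem.Set String :=
  PySem.Set.update reach
    (reach.foldl (fun acc n => PySem.Set.update acc (PySem.Dict.getD ⟨adj⟩ n [])) PySem.Set.empty)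

-- 'for d in range(DISTANCE_CAP + 1): if reach & targets: return d; reach |= …'
def satLoop (adj : List (String × List String)) (targets : PySem.Set String)
    (reach : PySem.Set String) : List Int → Option Int
  | [] => none
  | d :: rest =>
      if PySem.Set.inter reach targets ≠ [] then some d
      else satLoop adj targets (satStep adj reach) rest

def edge_pair_distance_py_alt (adj : List (String × List String)) (edge_a : String × String) (edge_b : String × String) : Option Int :=
  satLoop adj (PySem.Set.ofList [edge_b.1, edge_b.2]) (PySem.Set.ofList [edge_a.1, edge_a.2])
    (PySem.List.pyRange 0 7 1)

-- ===== PRECONDITION & SPEC =====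
def Spec_edge_pair_distance_py (adj : List (String × List String)) (edge_a : String × String) (edge_b : String × String) (out : Option Int) : Prop := out = edge_pair_distance_py_alt adj edge_a edge_b
instance (adj : List (String × List String)) (edge_a : String × String) (edge_b : String × String) (out : Option Int) : Decidable (Spec_edge_pair_distance_py adj edge_a edge_b out) := by unfold Spec_edge_pair_distance_py; infer_instance

-- ===== CLAIM (what is proved, stated in full; the proofs are below) =====
def Claim_equal_edge_pair_distance_py : Prop := ∀ (adj : List (String × List String)) (edge_a : String × String) (edge_b : String × String), Dom_edge_pair_distance_py adj edge_a edge_b → Spec_edge_pair_distance_py adj edge_a edge_b (edge_pair_distance_py adj edge_a edge_b)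

-- ===== LEMMAS AND PROOFS =====

-- ---- proof-side level-synchronous BFS, a half-way point between A's queue BFS and B's saturation ----

def lvlNbrs (targets visited : PySem.Set String) (nxt : List String)
    (ns : List String) (d : Int) : Sum Int (PySem.Set String × List String) :=
  match ns with
  | [] => .inr (visited, nxt)
  | n :: rest =>
      if PySem.Set.contains visited n then lvlNbrs targets visited nxt rest d
      else if PySem.Set.contains targets n then .inl (d + 1)
      else lvlNbrs targets (PySem.Set.add visited n) (nxt ++ [n]) rest d

def lvlFrontier (adj : List (String × List String)) (targets visited : PySem.Set String)
    (nxt : List String) (fr : List String) (d : Int) :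
    Sum Int (PySem.Set String × List String) :=
  match fr with
  | [] => .inr (visited, nxt)
  | node :: rest =>
      match lvlNbrs targets visited nxt (PySem.Dict.getD ⟨adj⟩ node []) d with
      | .inl r => .inl r
      | .inr (v', nxt') => lvlFrontier adj targets v' nxt' rest d

def lvlLoop (adj : List (String × List String)) (targets visited : PySem.Set String)
    (fr : List String) (d : Int) : Option Int :=
  if fr.isEmpty ∨ ¬ d < 6 then none
  else
    match lvlFrontier adj targets visited [] fr d with
    | .inl r => some r
    | .inr (v', nxt) => lvlLoop adj targets v' nxt (d + 1)
termination_by (6 - d).toNat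
decreasing_by
  rename_i h
  rw [not_or, not_not] at h
  omega

def capped_level_bfs (adj : List (String × List String)) (start : String)
    (targets : PySem.Set String) : Option Int :=
  if PySem.Set.contains targets start then some 0
  else lvlLoop adj targets (PySem.Set.ofList [start]) [start] 0

-- ---- stage 1: A's queue BFS equals the level BFS (bisimulation on queue shape) ----

theorem expand_align (targets : PySem.Set String) :
    ∀ (ns : List String) (visited : PySem.Set String) (R : List (String × Int))
      (nxt : List String) (d : Int),
      spcExpand targets visited (R ++ nxt.map (fun n => (n, d + 1))) ns d =
        (match lvlNbrs targets visited nxt ns d with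
         | .inl r => .inl r
         | .inr (v', nxt') => .inr (v', R ++ nxt'.map (fun n => (n, d + 1)))) := by
  intro ns
  induction ns with
  | nil => intro visited R nxt d; simp [spcExpand, lvlNbrs]
  | cons n rest ih =>
      intro visited R nxt d
      simp only [spcExpand, lvlNbrs]
      by_cases h1 : n ∈ visited
      · simp only [if_pos (by simpa [PySem.Set.contains_iff] using h1 : PySem.Set.contains visited n = true)]
        exact ih visited R nxt d
      · simp only [if_neg (by simpa [PySem.Set.contains_iff] using h1 :
          ¬ PySem.Set.contains visited n = true)]
        by_cases h2 : PySem.Set.contains targets n = true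
        · rw [if_pos h2, if_pos h2]
        · simp only [if_neg h2]
          have := ih (PySem.Set.add visited n) R (nxt ++ [n]) d
          simpa using this

theorem spcLoop_skip_all (adj : List (String × List String)) (targets : PySem.Set String) :
    ∀ (q : List (String × Int)) (seen : PySem.Set String),
      (∀ p ∈ q, 6 ≤ p.2) → spcLoop adj targets seen q = none := by
  intro q
  induction q with
  | nil => intro seen _; rw [spcLoop]
  | cons p rest ih =>
      intro seen hall
      obtain ⟨node, dist⟩ := p
      rw [spcLoop]
      rw [if_pos (hall (node, dist) (by simp))]
      exact ih seen (fun x hx => hall x (by simp [hx]))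

theorem bfs_align (adj : List (String × List String)) (targets : PySem.Set String) :
    ∀ (k : Nat) (fr p : List String) (visited : PySem.Set String) (d : Int),
      d < 6 → (6 - d).toNat = k →
      spcLoop adj targets visited
          (fr.map (fun n => (n, d)) ++ p.map (fun n => (n, d + 1))) =
        (match lvlFrontier adj targets visited p fr d with
         | .inl r => some r
         | .inr (v', nxt) => lvlLoop adj targets v' nxt (d + 1)) := by
  intro k
  induction k using Nat.strong_induction_on with
  | _ k IH =>
      intro fr
      induction fr with
      | nil =>
          intro p visited d hd hk
          simp only [List.map_nil, List.nil_append, lvlFrontier]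
          rw [lvlLoop]
          by_cases hp : p = []
          · subst hp
            rw [if_pos (by simp)]
            simp [spcLoop]
          · by_cases hcap : d + 1 < 6
            · rw [if_neg (by simp [hp, hcap])]
              have hrec := IH (6 - (d + 1)).toNat (by omega) p [] visited (d + 1) hcap rfl
              simpa using hrec
            · rw [if_pos (Or.inr hcap)]
              apply spcLoop_skip_all
              intro x hx
              simp at hx
              rcases hx with ⟨n, _, rfl⟩
              omega
      | cons node rest ihfr =>
          intro p visited d hd hk
          simp only [List.map_cons, List.cons_append]
          rw [spcLoop]
          rw [if_neg (by omega)]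
          have hal := expand_align targets (PySem.Dict.getD ⟨adj⟩ node [])
            visited (rest.map (fun n => (n, d))) p d
          simp only [lvlFrontier]
          cases hNb : lvlNbrs targets visited p (PySem.Dict.getD ⟨adj⟩ node []) d with
          | inl r =>
              simp only [hNb] at hal
              split
              · rename_i r' heq
                rw [hal] at heq
                cases heq
                rfl
              · rename_i seen' q' heq
                rw [hal] at heq
                cases heq
          | inr pr =>
              obtain ⟨v', p'⟩ := pr
              simp only [hNb] at hal
              split
              · rename_i r' heq
                rw [hal] at heq
                cases heq
              · rename_i seen' q' heq
                rw [hal] at heq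
                injection heq with h
                injection h with h1 h2
                subst h1
                subst h2
                exact ihfr p' v' d hd hk

theorem single_source_eq (adj : List (String × List String)) (start : String)
    (targets : PySem.Set String) :
    shortest_path_cap adj start targets = capped_level_bfs adj start targets := by
  unfold shortest_path_cap capped_level_bfs
  by_cases h : PySem.Set.contains targets start = true
  · rw [if_pos h, if_pos h]
  · rw [if_neg h, if_neg h]
    have hb := bfs_align adj targets ((6 - (0 : Int)).toNat) [start] []
      (PySem.Set.ofList [start]) 0 (by omega) rfl
    simp only [List.map_cons, List.map_nil, List.append_nil] at hb
    rw [hb, lvlLoop, if_neg]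
    simp

-- ---- membership characterisations of B's saturation step and loop ----

theorem mem_foldl_update {f : String → List String} :
    ∀ (l : List String) (s : PySem.Set String) (y : String),
      y ∈ l.foldl (fun acc n => PySem.Set.update acc (f n)) s ↔ y ∈ s ∨ ∃ n ∈ l, y ∈ f n := by
  intro l
  induction l with
  | nil => intro s y; simp
  | cons a l ih =>
      intro s y
      simp only [List.foldl_cons, ih, PySem.Set.mem_update]
      constructor
      · rintro (⟨h | h⟩ | ⟨n, hn, hy⟩)
        · exact Or.inl h
        · exact Or.inr ⟨a, by simp, h⟩
        · exact Or.inr ⟨n, by simp [hn], hy⟩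
      · rintro (h | ⟨n, hn, hy⟩)
        · exact Or.inl (Or.inl h)
        · rcases List.mem_cons.1 hn with rfl | hn'
          · exact Or.inl (Or.inr hy)
          · exact Or.inr ⟨n, hn', hy⟩

theorem mem_satStep (adj : List (String × List String)) (R : PySem.Set String) (y : String) :
    y ∈ satStep adj R ↔ y ∈ R ∨ ∃ n ∈ R, y ∈ PySem.Dict.getD ⟨adj⟩ n [] := by
  unfold satStep
  rw [PySem.Set.mem_update, mem_foldl_update]
  simp [PySem.Set.empty]

theorem inter_ne_nil_iff (R B : PySem.Set String) :
    PySem.Set.inter R B ≠ [] ↔ ∃ x, x ∈ R ∧ x ∈ B := by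
  constructor
  · intro h
    rcases List.exists_mem_of_ne_nil _ h with ⟨x, hx⟩
    exact ⟨x, (PySem.Set.mem_inter R B x).1 hx⟩
  · rintro ⟨x, hx1, hx2⟩ hc
    have : x ∈ PySem.Set.inter R B := (PySem.Set.mem_inter R B x).2 ⟨hx1, hx2⟩
    simp [hc] at this

theorem satLoop_congr (adj : List (String × List String)) (B : PySem.Set String) :
    ∀ (ds : List Int) (R R' : PySem.Set String),
      (∀ x, x ∈ R ↔ x ∈ R') → satLoop adj B R ds = satLoop adj B R' ds := by
  intro ds
  induction ds with
  | nil => intro R R' _; rfl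
  | cons d rest ih =>
      intro R R' h
      simp only [satLoop]
      by_cases hne : ∃ x, x ∈ R ∧ x ∈ B
      · rw [if_pos ((inter_ne_nil_iff R B).2 hne),
          if_pos ((inter_ne_nil_iff R' B).2 (by rcases hne with ⟨x, h1, h2⟩; exact ⟨x, (h x).1 h1, h2⟩))]
      · rw [if_neg (fun hc => hne ((inter_ne_nil_iff R B).1 hc)),
          if_neg (fun hc => hne (by rcases (inter_ne_nil_iff R' B).1 hc with ⟨x, h1, h2⟩; exact ⟨x, (h x).2 h1, h2⟩))]
        apply ih
        intro x
        rw [mem_satStep, mem_satStep]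
        constructor
        · rintro (hx | ⟨n, hn, hy⟩)
          · exact Or.inl ((h x).1 hx)
          · exact Or.inr ⟨n, (h n).1 hn, hy⟩
        · rintro (hx | ⟨n, hn, hy⟩)
          · exact Or.inl ((h x).2 hx)
          · exact Or.inr ⟨n, (h n).2 hn, hy⟩

-- a closed, target-disjoint reach set never finds anything
theorem satLoop_closed_none (adj : List (String × List String)) (B : PySem.Set String) :
    ∀ (ds : List Int) (R : PySem.Set String),
      (∀ x n, n ∈ R → x ∈ PySem.Dict.getD ⟨adj⟩ n [] → x ∈ R) →
      (∀ x ∈ R, x ∉ B) →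
      satLoop adj B R ds = none := by
  intro ds
  induction ds with
  | nil => intro R _ _; rfl
  | cons d rest ih =>
      intro R hcl hdis
      simp only [satLoop]
      rw [if_neg]
      · rw [satLoop_congr adj B rest (satStep adj R) R
          (by intro x; rw [mem_satStep]; constructor
              · rintro (hx | ⟨n, hn, hy⟩)
                · exact hx
                · exact hcl x n hn hy
              · exact Or.inl)]
        exact ih R hcl hdis
      · intro hc
        rcases (inter_ne_nil_iff R B).1 hc with ⟨x, h1, h2⟩
        exact hdis x h1 h2

theorem satLoop_mem (adj : List (String × List String)) (B : PySem.Set String) :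
    ∀ (ds : List Int) (R : PySem.Set String) (v : Int),
      satLoop adj B R ds = some v → v ∈ ds := by
  intro ds
  induction ds with
  | nil => intro R v h; simp [satLoop] at h
  | cons d rest ih =>
      intro R v h
      simp only [satLoop] at h
      split at h
      · cases h; simp
      · exact List.mem_cons_of_mem _ (ih _ v h)

-- ---- the distance lists [d, d+1, …, 6] ----

def mkDs : Int → Nat → List Int
  | _, 0 => []
  | d, r + 1 => d :: mkDs (d + 1) r

theorem mkDs_le : ∀ (r : Nat) (d v : Int), v ∈ mkDs d r → d ≤ v := by
  intro r
  induction r with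
  | zero => intro d v h; simp [mkDs] at h
  | succ r ih =>
      intro d v h
      rcases List.mem_cons.1 h with rfl | h'
      · omega
      · have := ih (d + 1) v h'
        omega

-- ---- stage 3: multi-source saturation = min of single-source saturations ----

def minOpt : Option Int → Option Int → Option Int
  | none, o => o
  | some a, none => some a
  | some a, some b => some (min a b)

theorem sat_union (adj : List (String × List String)) (B : PySem.Set String) :
    ∀ (r : Nat) (d : Int) (R R1 R2 : PySem.Set String),
      (∀ x, x ∈ R ↔ x ∈ R1 ∨ x ∈ R2) →
      satLoop adj B R (mkDs d r) =
        minOpt (satLoop adj B R1 (mkDs d r)) (satLoop adj B R2 (mkDs d r)) := by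
  intro r
  induction r with
  | zero => intro d R R1 R2 _; simp [mkDs, satLoop, minOpt]
  | succ r ih =>
      intro d R R1 R2 hR
      simp only [mkDs, satLoop]
      by_cases h1 : ∃ x, x ∈ R1 ∧ x ∈ B
      · rw [if_pos ((inter_ne_nil_iff R1 B).2 h1)]
        rw [if_pos ((inter_ne_nil_iff R B).2
          (by rcases h1 with ⟨x, hx1, hx2⟩; exact ⟨x, (hR x).2 (Or.inl hx1), hx2⟩))]
        by_cases h2 : ∃ x, x ∈ R2 ∧ x ∈ B
        · rw [if_pos ((inter_ne_nil_iff R2 B).2 h2)]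
          simp [minOpt]
        · rw [if_neg (fun hc => h2 ((inter_ne_nil_iff R2 B).1 hc))]
          cases hv : satLoop adj B (satStep adj R2) (mkDs (d + 1) r) with
          | none => simp [minOpt]
          | some v =>
              have hle := mkDs_le r (d + 1) v (satLoop_mem adj B _ _ v hv)
              simp only [minOpt]
              congr 1
              omega
      · rw [if_neg (fun hc => h1 ((inter_ne_nil_iff R1 B).1 hc))]
        by_cases h2 : ∃ x, x ∈ R2 ∧ x ∈ B
        · rw [if_pos ((inter_ne_nil_iff R2 B).2 h2)]
          rw [if_pos ((inter_ne_nil_iff R B).2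
            (by rcases h2 with ⟨x, hx1, hx2⟩; exact ⟨x, (hR x).2 (Or.inr hx1), hx2⟩))]
          cases hv : satLoop adj B (satStep adj R1) (mkDs (d + 1) r) with
          | none => simp [minOpt]
          | some v =>
              have hle := mkDs_le r (d + 1) v (satLoop_mem adj B _ _ v hv)
              simp only [minOpt]
              congr 1
              omega
        · rw [if_neg (fun hc => h2 ((inter_ne_nil_iff R2 B).1 hc))]
          rw [if_neg (fun hc => by
            rcases (inter_ne_nil_iff R B).1 hc with ⟨x, hx1, hx2⟩
            rcases (hR x).1 hx1 with h | h
            · exact h1 ⟨x, h, hx2⟩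
            · exact h2 ⟨x, h, hx2⟩)]
          apply ih
          intro x
          rw [mem_satStep, mem_satStep, mem_satStep]
          constructor
          · rintro (hx | ⟨n, hn, hy⟩)
            · rcases (hR x).1 hx with h | h
              · exact Or.inl (Or.inl h)
              · exact Or.inr (Or.inl h)
            · rcases (hR n).1 hn with h | h
              · exact Or.inl (Or.inr ⟨n, h, hy⟩)
              · exact Or.inr (Or.inr ⟨n, h, hy⟩)
          · rintro ((hx | ⟨n, hn, hy⟩) | (hx | ⟨n, hn, hy⟩))
            · exact Or.inl ((hR x).2 (Or.inl hx))
            · exact Or.inr ⟨n, (hR n).2 (Or.inl hn), hy⟩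
            · exact Or.inl ((hR x).2 (Or.inr hx))
            · exact Or.inr ⟨n, (hR n).2 (Or.inr hn), hy⟩

-- ---- stage 2: level BFS = single-source view of the saturation loop ----

theorem lvlNbrs_found (B : PySem.Set String) :
    ∀ (ns : List String) (visited : PySem.Set String) (nxt : List String) (d : Int),
      (∀ x ∈ visited, x ∉ B) → (∃ x ∈ ns, x ∈ B) →
      lvlNbrs B visited nxt ns d = .inl (d + 1) := by
  intro ns
  induction ns with
  | nil => intro visited nxt d _ h; simp at h
  | cons n rest ih =>
      intro visited nxt d hB hex
      simp only [lvlNbrs]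
      by_cases h1 : n ∈ visited
      · rw [if_pos (by simpa [PySem.Set.contains_iff] using h1)]
        apply ih visited nxt d hB
        rcases hex with ⟨x, hx, hxB⟩
        rcases List.mem_cons.1 hx with rfl | hx'
        · exact absurd hxB (hB x h1)
        · exact ⟨x, hx', hxB⟩
      · rw [if_neg (by simpa [PySem.Set.contains_iff] using h1)]
        by_cases h2 : n ∈ B
        · rw [if_pos (by simpa [PySem.Set.contains_iff] using h2)]
        · rw [if_neg (by simpa [PySem.Set.contains_iff] using h2)]
          apply ih _ _ d
          · intro x hx
            rcases (PySem.Set.mem_add _ _ _).1 hx with hx' | rfl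
            · exact hB x hx'
            · exact h2
          · rcases hex with ⟨x, hx, hxB⟩
            rcases List.mem_cons.1 hx with rfl | hx'
            · exact absurd hxB h2
            · exact ⟨x, hx', hxB⟩

theorem lvlNbrs_none (B : PySem.Set String) :
    ∀ (ns : List String) (visited : PySem.Set String) (nxt : List String) (d : Int),
      (∀ x ∈ nxt, x ∈ visited) → (¬ ∃ x ∈ ns, x ∈ B) →
      ∃ v' nxt', lvlNbrs B visited nxt ns d = .inr (v', nxt') ∧
        (∀ x, x ∈ v' ↔ x ∈ visited ∨ x ∈ ns) ∧
        (∀ x, x ∈ nxt' ↔ x ∈ nxt ∨ (x ∈ ns ∧ x ∉ visited)) ∧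
        (∀ x ∈ nxt', x ∈ v') := by
  intro ns
  induction ns with
  | nil =>
      intro visited nxt d hnx _
      exact ⟨visited, nxt, rfl, by simp, by simp, hnx⟩
  | cons n rest ih =>
      intro visited nxt d hnx hex
      have hnB : n ∉ B := fun h => hex ⟨n, by simp, h⟩
      have hrest : ¬ ∃ x ∈ rest, x ∈ B := fun ⟨x, hx, hB⟩ => hex ⟨x, by simp [hx], hB⟩
      simp only [lvlNbrs]
      by_cases h1 : n ∈ visited
      · rw [if_pos (by simpa [PySem.Set.contains_iff] using h1)]
        obtain ⟨v', nxt', heq, hv, hn, hsub⟩ := ih visited nxt d hnx hrest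
        refine ⟨v', nxt', heq, ?_, ?_, hsub⟩
        · intro x
          rw [hv x]
          constructor
          · rintro (h | h)
            · exact Or.inl h
            · exact Or.inr (by simp [h])
          · rintro (h | h)
            · exact Or.inl h
            · rcases List.mem_cons.1 h with rfl | h'
              · exact Or.inl h1
              · exact Or.inr h'
        · intro x
          rw [hn x]
          constructor
          · rintro (h | ⟨h, h2⟩)
            · exact Or.inl h
            · exact Or.inr ⟨by simp [h], h2⟩
          · rintro (h | ⟨h, h2⟩)
            · exact Or.inl h
            · rcases List.mem_cons.1 h with rfl | h'
              · exact absurd h1 h2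
              · exact Or.inr ⟨h', h2⟩
      · rw [if_neg (by simpa [PySem.Set.contains_iff] using h1),
          if_neg (by simpa [PySem.Set.contains_iff] using hnB)]
        obtain ⟨v', nxt', heq, hv, hn, hsub⟩ := ih (PySem.Set.add visited n) (nxt ++ [n]) d
          (by intro x hx
              rcases List.mem_append.1 hx with hx' | hx'
              · exact (PySem.Set.mem_add _ _ _).2 (Or.inl (hnx x hx'))
              · exact (PySem.Set.mem_add _ _ _).2 (Or.inr (by simpa using hx'))) hrest
        refine ⟨v', nxt', heq, ?_, ?_, hsub⟩
        · intro x
          rw [hv x]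
          rw [PySem.Set.mem_add]
          constructor
          · rintro ((h | rfl) | h)
            · exact Or.inl h
            · exact Or.inr (by simp)
            · exact Or.inr (by simp [h])
          · rintro (h | h)
            · exact Or.inl (Or.inl h)
            · rcases List.mem_cons.1 h with rfl | h'
              · exact Or.inl (Or.inr rfl)
              · exact Or.inr h'
        · intro x
          rw [hn x]
          rw [PySem.Set.mem_add]
          constructor
          · rintro (h | ⟨h, h2⟩)
            · rcases List.mem_append.1 h with h' | h'
              · exact Or.inl h'
              · simp at h'
                subst h'
                exact Or.inr ⟨by simp, h1⟩
            · have hne : x ≠ n := fun hc => h2 (Or.inr hc)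
              have hnv : x ∉ visited := fun hc => h2 (Or.inl hc)
              exact Or.inr ⟨by simp [h], hnv⟩
          · rintro (h | ⟨h, h2⟩)
            · exact Or.inl (by simp [h])
            · rcases List.mem_cons.1 h with rfl | h'
              · exact Or.inl (by simp)
              · by_cases hxn : x = n
                · subst hxn; exact Or.inl (by simp)
                · exact Or.inr ⟨h', fun hc => by
                    rcases hc with hc' | hc'
                    · exact h2 hc'
                    · exact hxn hc'⟩

theorem lvlFrontier_found (adj : List (String × List String)) (B : PySem.Set String) :
    ∀ (fr : List String) (visited : PySem.Set String) (nxt : List String) (d : Int),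
      (∀ x ∈ visited, x ∉ B) → (∀ x ∈ nxt, x ∈ visited) →
      (∃ n ∈ fr, ∃ x ∈ PySem.Dict.getD ⟨adj⟩ n [], x ∈ B) →
      lvlFrontier adj B visited nxt fr d = .inl (d + 1) := by
  intro fr
  induction fr with
  | nil => intro visited nxt d _ _ h; simp at h
  | cons node rest ih =>
      intro visited nxt d hB hnx hex
      simp only [lvlFrontier]
      by_cases hn1 : ∃ x ∈ PySem.Dict.getD ⟨adj⟩ node [], x ∈ B
      · rw [lvlNbrs_found B _ visited nxt d hB hn1]
      · obtain ⟨v', nxt', heq, hv, hn, hsub⟩ := lvlNbrs_none B _ visited nxt d hnx hn1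
        rw [heq]
        apply ih v' nxt' d
        · intro x hx
          rcases (hv x).1 hx with h | h
          · exact hB x h
          · exact fun hc => hn1 ⟨x, h, hc⟩
        · exact hsub
        · rcases hex with ⟨n, hnfr, hx⟩
          rcases List.mem_cons.1 hnfr with rfl | h'
          · exact absurd hx hn1
          · exact ⟨n, h', hx⟩

theorem lvlFrontier_none (adj : List (String × List String)) (B : PySem.Set String) :
    ∀ (fr : List String) (visited : PySem.Set String) (nxt : List String) (d : Int),
      (∀ x ∈ visited, x ∉ B) → (∀ x ∈ nxt, x ∈ visited) →
      (¬ ∃ n ∈ fr, ∃ x ∈ PySem.Dict.getD ⟨adj⟩ n [], x ∈ B) →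
      ∃ v' nxt', lvlFrontier adj B visited nxt fr d = .inr (v', nxt') ∧
        (∀ x, x ∈ v' ↔ x ∈ visited ∨ ∃ n ∈ fr, x ∈ PySem.Dict.getD ⟨adj⟩ n []) ∧
        (∀ x, x ∈ nxt' ↔ x ∈ nxt ∨ ((∃ n ∈ fr, x ∈ PySem.Dict.getD ⟨adj⟩ n []) ∧ x ∉ visited)) ∧
        (∀ x ∈ nxt', x ∈ v') := by
  intro fr
  induction fr with
  | nil =>
      intro visited nxt d _ hnx _
      exact ⟨visited, nxt, rfl, by simp, by simp, hnx⟩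
  | cons node rest ih =>
      intro visited nxt d hB hnx hex
      have hn1 : ¬ ∃ x ∈ PySem.Dict.getD ⟨adj⟩ node [], x ∈ B :=
        fun ⟨x, hx, hBx⟩ => hex ⟨node, by simp, x, hx, hBx⟩
      have hrest : ¬ ∃ n ∈ rest, ∃ x ∈ PySem.Dict.getD ⟨adj⟩ n [], x ∈ B :=
        fun ⟨n, hn, hx⟩ => hex ⟨n, by simp [hn], hx⟩
      simp only [lvlFrontier]
      obtain ⟨v1, nxt1, heq1, hv1, hn1c, hsub1⟩ := lvlNbrs_none B _ visited nxt d hnx hn1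
      rw [heq1]
      obtain ⟨v', nxt', heq, hv, hn, hsub⟩ := ih v1 nxt1 d
        (by intro x hx
            rcases (hv1 x).1 hx with h | h
            · exact hB x h
            · exact fun hc => hn1 ⟨x, h, hc⟩)
        hsub1 hrest
      refine ⟨v', nxt', heq, ?_, ?_, hsub⟩
      · intro x
        rw [hv x]
        constructor
        · rintro (h | ⟨n, hn', hx⟩)
          · rcases (hv1 x).1 h with h' | h'
            · exact Or.inl h'
            · exact Or.inr ⟨node, by simp, h'⟩
          · exact Or.inr ⟨n, by simp [hn'], hx⟩
        · rintro (h | ⟨n, hn', hx⟩)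
          · exact Or.inl ((hv1 x).2 (Or.inl h))
          · rcases List.mem_cons.1 hn' with rfl | h'
            · exact Or.inl ((hv1 x).2 (Or.inr hx))
            · exact Or.inr ⟨n, h', hx⟩
      · intro x
        rw [hn x]
        constructor
        · rintro (h | ⟨⟨n, hn', hx⟩, hnv1⟩)
          · rcases (hn1c x).1 h with h' | ⟨h', h2⟩
            · exact Or.inl h'
            · exact Or.inr ⟨⟨node, by simp, h'⟩, h2⟩
          · have hnv : x ∉ visited := fun hc => hnv1 ((hv1 x).2 (Or.inl hc))
            exact Or.inr ⟨⟨n, by simp [hn'], hx⟩, hnv⟩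
        · rintro (h | ⟨⟨n, hn', hx⟩, hnv⟩)
          · exact Or.inl ((hn1c x).2 (Or.inl h))
          · rcases List.mem_cons.1 hn' with rfl | h'
            · exact Or.inl ((hn1c x).2 (Or.inr ⟨hx, hnv⟩))
            · by_cases hx1 : x ∈ v1
              · rcases (hv1 x).1 hx1 with hc | hc
                · exact absurd hc hnv
                · exact Or.inl ((hn1c x).2 (Or.inr ⟨hc, hnv⟩))
              · exact Or.inr ⟨⟨n, h', hx⟩, hx1⟩

-- the main bisimulation: level BFS state (visited, frontier, d) against saturation state R
theorem lvl_sat (adj : List (String × List String)) (B : PySem.Set String) :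
    ∀ (r : Nat) (d : Int) (V : PySem.Set String) (F : List String) (P : List String)
      (R : PySem.Set String),
      r = (6 - d).toNat → 0 ≤ d → d ≤ 6 →
      (∀ x, x ∈ V ↔ x ∈ P ∨ x ∈ F) →
      (∀ n x, n ∈ P → x ∈ PySem.Dict.getD ⟨adj⟩ n [] → x ∈ V) →
      (∀ x, x ∈ R ↔ x ∈ V ∨ ∃ n ∈ F, x ∈ PySem.Dict.getD ⟨adj⟩ n []) →
      (∀ x ∈ V, x ∉ B) →
      lvlLoop adj B V F d = satLoop adj B R (mkDs (d + 1) r) := by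
  intro r
  induction r with
  | zero =>
      intro d V F P R hr h0 h6 _ _ _ _
      have hd : d = 6 := by omega
      subst hd
      rw [lvlLoop, if_pos (Or.inr (by omega))]
      rfl
  | succ r ih =>
      intro d V F P R hr h0 h6 hVPF hNP hR hB
      have hd6 : d < 6 := by omega
      cases hF : F with
      | nil =>
          rw [lvlLoop, if_pos (Or.inl (by simp))]
          subst hF
          refine (satLoop_closed_none adj B _ R ?_ ?_).symm
          · intro x n hn hx
            rcases (hR n).1 hn with hnV | ⟨m, hm, _⟩
            · rcases (hVPF n).1 hnV with hP | hFm
              · exact (hR x).2 (Or.inl (hNP n x hP hx))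
              · simp at hFm
            · simp at hm
          · intro x hx
            rcases (hR x).1 hx with h | ⟨m, hm, _⟩
            · exact hB x h
            · simp at hm
      | cons f fs =>
          rw [lvlLoop, if_neg (by simp [hd6])]
          subst hF
          by_cases hfound : ∃ n ∈ f :: fs, ∃ x ∈ PySem.Dict.getD ⟨adj⟩ n [], x ∈ B
          · rw [lvlFrontier_found adj B _ V [] d hB (by simp) hfound]
            simp only [mkDs, satLoop]
            rw [if_pos ((inter_ne_nil_iff R B).2 (by
              rcases hfound with ⟨n, hn, x, hx, hBx⟩
              exact ⟨x, (hR x).2 (Or.inr ⟨n, hn, hx⟩), hBx⟩))]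
          · obtain ⟨v', nxt', heq, hv, hn, _⟩ :=
              lvlFrontier_none adj B (f :: fs) V [] d hB (by simp) hfound
            rw [heq]
            simp only [mkDs, satLoop]
            rw [if_neg (fun hc => by
              rcases (inter_ne_nil_iff R B).1 hc with ⟨x, hx1, hx2⟩
              rcases (hR x).1 hx1 with h | ⟨n, hnf, hx⟩
              · exact hB x h hx2
              · exact hfound ⟨n, hnf, x, hx, hx2⟩)]
            have hstep := ih (d + 1) v' nxt' V (satStep adj R)
              (by omega) (by omega) (by omega)
              (by intro x
                  rw [hv x]
                  constructor
                  · rintro (h | h)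
                    · exact Or.inl h
                    · by_cases hxV : x ∈ V
                      · exact Or.inl hxV
                      · exact Or.inr ((hn x).2 (Or.inr ⟨h, hxV⟩))
                  · rintro (h | h)
                    · exact Or.inl h
                    · rcases (hn x).1 h with h' | ⟨h', _⟩
                      · simp at h'
                      · exact Or.inr h')
              (by intro n x hnV hx
                  rcases (hVPF n).1 hnV with hP | hFm
                  · exact (hv x).2 (Or.inl (hNP n x hP hx))
                  · exact (hv x).2 (Or.inr ⟨n, hFm, hx⟩))
              (by intro x
                  rw [mem_satStep]
                  constructor
                  · rintro (hx | ⟨n, hnR, hy⟩)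
                    · rcases (hR x).1 hx with h | h
                      · exact Or.inl ((hv x).2 (Or.inl h))
                      · exact Or.inl ((hv x).2 (Or.inr h))
                    · rcases (hR n).1 hnR with hnV | ⟨m, hmf, hnm⟩
                      · rcases (hVPF n).1 hnV with hP | hFm
                        · exact Or.inl ((hv x).2 (Or.inl (hNP n x hP hy)))
                        · exact Or.inl ((hv x).2 (Or.inr ⟨n, hFm, hy⟩))
                      · by_cases hnv : n ∈ V
                        · rcases (hVPF n).1 hnv with hP | hFm
                          · exact Or.inl ((hv x).2 (Or.inl (hNP n x hP hy)))
                          · exact Or.inl ((hv x).2 (Or.inr ⟨n, hFm, hy⟩))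
                        · exact Or.inr ⟨n, (hn n).2 (Or.inr ⟨⟨m, hmf, hnm⟩, hnv⟩), hy⟩
                  · rintro (hx | ⟨n, hnn, hy⟩)
                    · rcases (hv x).1 hx with h | h
                      · exact Or.inl ((hR x).2 (Or.inl h))
                      · exact Or.inl ((hR x).2 (Or.inr h))
                    · rcases (hn n).1 hnn with h' | ⟨⟨m, hmf, hnm⟩, _⟩
                      · simp at h'
                      · exact Or.inr ⟨n, (hR n).2 (Or.inr ⟨m, hmf, hnm⟩), hy⟩)
              (by intro x hx
                  rcases (hv x).1 hx with h | ⟨n, hnf, hxn⟩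
                  · exact hB x h
                  · exact fun hc => hfound ⟨n, hnf, x, hxn, hc⟩)
            rw [hstep]

-- level BFS from a single source = saturation from that singleton
theorem lvl_eq_sat_single (adj : List (String × List String)) (B : PySem.Set String)
    (s : String) :
    capped_level_bfs adj s B = satLoop adj B (PySem.Set.ofList [s]) (mkDs 0 7) := by
  unfold capped_level_bfs
  have hofl : PySem.Set.ofList [s] = [s] := by
    apply PySem.Set.ofList_eq_self_of_nodup
    simp
  by_cases h : s ∈ B
  · rw [if_pos (by simpa [PySem.Set.contains_iff] using h)]
    show _ = satLoop adj B (PySem.Set.ofList [s]) ((0 : Int) :: mkDs 1 6)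
    rw [satLoop, if_pos ((inter_ne_nil_iff _ B).2 ⟨s, by simp [hofl], h⟩)]
  · rw [if_neg (by simpa [PySem.Set.contains_iff] using h)]
    show lvlLoop adj B (PySem.Set.ofList [s]) [s] 0 =
      satLoop adj B (PySem.Set.ofList [s]) ((0 : Int) :: mkDs 1 6)
    rw [satLoop, if_neg (fun hc => by
      rcases (inter_ne_nil_iff _ B).1 hc with ⟨x, hx1, hx2⟩
      rw [hofl] at hx1
      simp at hx1
      subst hx1
      exact h hx2)]
    have := lvl_sat adj B 6 0 (PySem.Set.ofList [s]) [s] [] (satStep adj (PySem.Set.ofList [s]))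
      (by omega) (by omega) (by omega)
      (by intro x; rw [hofl]; simp)
      (by intro n x hn; simp at hn)
      (by intro x
          rw [mem_satStep, hofl])
      (by intro x hx
          rw [hofl] at hx
          simp at hx
          subst hx
          exact h)
    exact this

-- A's outer fold-then-min over the collected distances equals minOpt
theorem outer_two (f : String → Option Int) (a b : String) :
    (let dists := [a, b].foldl
        (fun acc node => match f node with | some d => acc ++ [d] | none => acc) ([] : List Int);
      if dists.isEmpty then none else PySem.List.min? dists (fun x => x)) =
    minOpt (f a) (f b) := by
  cases h1 : f a with
  | none =>
      cases h2 : f b with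
      | none => simp [h1, h2, minOpt]
      | some y => simp [h1, h2, PySem.List.min?, minOpt]
  | some x =>
      cases h2 : f b with
      | none => simp [h1, h2, PySem.List.min?, minOpt]
      | some y =>
          simp only [List.foldl_cons, List.foldl_nil, h1, h2, List.nil_append,
            List.singleton_append]
          have hm : PySem.List.min? [x, y] (fun z => z) = some (min x y) := by
            rw [PySem.List.min?_id_cons]
            simp only [List.foldl_cons, List.foldl_nil]
          simp [hm, minOpt]

theorem outer_one (f : String → Option Int) (a : String) :
    (let dists := [a].foldl
        (fun acc node => match f node with | some d => acc ++ [d] | none => acc) ([] : List Int);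
      if dists.isEmpty then none else PySem.List.min? dists (fun x => x)) =
    minOpt (f a) (f a) := by
  cases h1 : f a with
  | none => simp [h1, minOpt]
  | some x => simp [h1, PySem.List.min?, minOpt]

theorem ofList_pair_self (x : String) : PySem.Set.ofList [x, x] = [x] := by
  rw [PySem.Set.ofList_cons, PySem.Set.ofList_cons, PySem.Set.ofList_nil]
  simp [PySem.Set.discard]

theorem pyRange07 : PySem.List.pyRange 0 7 1 = mkDs 0 7 := by decide

-- ===== VERDICT (by name: the statement is the Claim_ definition above) =====
theorem edge_pair_distance_py_spec : Claim_equal_edge_pair_distance_py := by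
  intro adj ea eb _
  unfold Spec_edge_pair_distance_py edge_pair_distance_py edge_pair_distance_py_alt
  rw [pyRange07]
  have hB : ∀ s, shortest_path_cap adj s (PySem.Set.ofList [eb.1, eb.2])
      = satLoop adj (PySem.Set.ofList [eb.1, eb.2]) (PySem.Set.ofList [s]) (mkDs 0 7) := by
    intro s
    rw [single_source_eq, lvl_eq_sat_single]
  have hunion := sat_union adj (PySem.Set.ofList [eb.1, eb.2]) 7 0
    (PySem.Set.ofList [ea.1, ea.2]) (PySem.Set.ofList [ea.1]) (PySem.Set.ofList [ea.2])
    (by intro x; simp [PySem.Set.mem_ofList])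
  rw [hunion]
  by_cases hxy : ea.1 = ea.2
  · have hset : PySem.Set.ofList [ea.1, ea.2] = [ea.1] := by
      rw [← hxy]; exact ofList_pair_self ea.1
    rw [hset]
    have h := outer_one (fun s => shortest_path_cap adj s (PySem.Set.ofList [eb.1, eb.2])) ea.1
    simp only [hB ea.1] at h
    rw [← hxy]
    exact h
  · have hset : PySem.Set.ofList [ea.1, ea.2] = [ea.1, ea.2] := by
      apply PySem.Set.ofList_eq_self_of_nodup
      simp [hxy]
    rw [hset]
    have h := outer_two (fun s => shortest_path_cap adj s (PySem.Set.ofList [eb.1, eb.2])) ea.1 ea.2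
    simp only [hB ea.1, hB ea.2] at h
    exact h
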